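-- pv_equiv track=rewrite | github.com/JoeyHinckley34/MathMosaic | pyMM.py | apply_concat_pattern
-- ===== SOURCE A (Python) =====
-- def apply_concat_pattern(numbers, pattern):
--     result = []
--     current = str(numbers[0])
--     for num, concat in zip(numbers[1:], pattern):
--         if concat:
--             current += str(num)
--         else:
--             result.append(int(current))
--             current = str(num)
--     result.append(int(current))
--     return result
-- ===== SOURCE B (Python) =====
-- def apply_concat_pattern(numbers, pattern):
--     # Staged index-based decomposition: (1) compute the cut positions into
--     # `numbers` (a cut after position i whenever pattern[i] is falsy),
--     # (2) slice the used prefix of numbers at consecutive cuts,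
--     # (3) convert each slice to an int by string concatenation.
--     k = 1 + min(len(numbers) - 1, len(pattern))
--     cuts = [0] + [i + 1 for i in range(k - 1) if not pattern[i]] + [k]
--     return [int(''.join(str(x) for x in numbers[a:b]))
--             for a, b in zip(cuts, cuts[1:])]
-- ===== Notes on version B (the rewrite author's own statement) =====
-- stated objective: alternative
-- what changed: B replaces A's single left-to-right pass with a flushed string accumulator by a staged index computation: it first computes the list of cut positions (where the pattern is falsy), then slices numbers at consecutive cuts, then converts each slice independently; there is no running accumulator at all.
import Mathlib
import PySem

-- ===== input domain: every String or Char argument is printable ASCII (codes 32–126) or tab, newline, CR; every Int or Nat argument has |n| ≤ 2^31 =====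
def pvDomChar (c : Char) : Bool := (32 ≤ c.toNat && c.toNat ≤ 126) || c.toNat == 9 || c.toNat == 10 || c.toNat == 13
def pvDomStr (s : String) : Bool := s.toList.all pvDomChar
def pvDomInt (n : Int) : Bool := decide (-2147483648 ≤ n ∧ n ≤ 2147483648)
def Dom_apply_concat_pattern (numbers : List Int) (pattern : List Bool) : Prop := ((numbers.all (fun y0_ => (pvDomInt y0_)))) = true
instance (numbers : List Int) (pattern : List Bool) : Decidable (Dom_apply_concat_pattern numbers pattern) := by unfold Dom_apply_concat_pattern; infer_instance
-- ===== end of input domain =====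

-- B replaces A's single pass with a flushed string accumulator by a staged
-- index computation: compute the cut positions dictated by the pattern,
-- slice numbers at consecutive cuts, convert each slice independently.
-- Alternative structure, same cost.

-- ===== PORT A =====
-- the loop: state (result, current); strings kept as List Char (PySem.Chars)
def acpLoopA : List (Int × Bool) → List Int → List Char → List Int
  | [], result, current => result ++ [(PySem.Int.ofChars? current).getD 0]
  | (num, concat) :: rest, result, current =>
      if concat then
        acpLoopA rest result (current ++ PySem.Int.toChars num)
      else
        acpLoopA rest (result ++ [(PySem.Int.ofChars? current).getD 0]) (PySem.Int.toChars num)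

def apply_concat_pattern (numbers : List Int) (pattern : List Bool) : List Int :=
  match numbers with
  | [] => []  -- numbers[0] raises IndexError in Python; excluded by Pre_
  | n0 :: rest => acpLoopA (rest.zip pattern) [] (PySem.Int.toChars n0)

-- ===== PORT B =====
-- int(''.join(str(x) for x in seg))
def acpSegInt (g : List Int) : Int :=
  (PySem.Int.ofChars? (PySem.Chars.join [] (g.map PySem.Int.toChars))).getD 0

def apply_concat_pattern_alt (numbers : List Int) (pattern : List Bool) : List Int :=
  -- k = 1 + min(len(numbers) - 1, len(pattern))  (numbers ≠ [] on Pre_, so Nat '-' is exact)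
  let k : Nat := 1 + min (numbers.length - 1) pattern.length
  -- cuts = [0] + [i+1 for i in range(k-1) if not pattern[i]] + [k]
  -- (i < k-1 ≤ len(pattern), so getD's default is never consulted: pattern[i] is exact)
  let cuts : List Nat :=
    [0] ++ ((List.range (k - 1)).filterMap fun i =>
      if pattern.getD i true then none else some (i + 1)) ++ [k]
  (cuts.zip cuts.tail).map fun ab =>
    acpSegInt (PySem.List.slice numbers (some (ab.1 : Int)) (some (ab.2 : Int)))

-- ===== PRECONDITION & SPEC =====
-- Pre_ excludes the inputs where Python A raises: the empty numbers list
-- (IndexError on numbers[0]) and any input where a negative number is to be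
-- concatenated onto a previous one (int('…-…') raises ValueError).
def Pre_apply_concat_pattern (numbers : List Int) (pattern : List Bool) : Prop :=
  numbers ≠ [] ∧ ∀ p ∈ (numbers.drop 1).zip pattern, p.2 = true → 0 ≤ p.1
instance (numbers : List Int) (pattern : List Bool) : Decidable (Pre_apply_concat_pattern numbers pattern) := by
  unfold Pre_apply_concat_pattern; infer_instance

def pvWitness_apply_concat_pattern : List Int × List Bool := ([12, 3, 45], [true, false])

def Spec_apply_concat_pattern (numbers : List Int) (pattern : List Bool) (out : List Int) : Prop := out = apply_concat_pattern_alt numbers pattern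
instance (numbers : List Int) (pattern : List Bool) (out : List Int) : Decidable (Spec_apply_concat_pattern numbers pattern out) := by unfold Spec_apply_concat_pattern; infer_instance

-- ===== CLAIM =====
def Claim_equal_apply_concat_pattern : Prop := ∀ (numbers : List Int) (pattern : List Bool), Dom_apply_concat_pattern numbers pattern → Pre_apply_concat_pattern numbers pattern → Spec_apply_concat_pattern numbers pattern (apply_concat_pattern numbers pattern)

-- ===== LEMMAS AND PROOFS =====

-- proof-side middle form: the groups both programs denote
def acpGrp : List Int → List (Int × Bool) → List (List Int)
  | g, [] => [g]
  | g, (n, concat) :: t => if concat then acpGrp (g ++ [n]) t else g :: acpGrp [n] t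

-- proof-side: segments of xs between consecutive cuts (prev cut a, remaining cuts)
def acpSegs (xs : List Int) : Nat → List Nat → List (List Int)
  | _, [] => []
  | a, b :: cs => ((xs.drop a).take (b - a)) :: acpSegs xs b cs

-- proof-side: B's break comprehension over the zipped pairs
def acpBreaks (pairs : List (Int × Bool)) : List Nat :=
  (List.range pairs.length).filterMap fun i =>
    if (pairs.getD i (0, true)).2 then none else some (i + 1)

theorem acp_join_cons (x : List Char) (l : List (List Char)) :
    PySem.Chars.join [] (x :: l) = x ++ PySem.Chars.join [] l := by
  cases l with
  | nil => simp [PySem.Chars.join_singleton, PySem.Chars.join_nil]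
  | cons b t => rw [PySem.Chars.join_cons_cons]; simp

theorem acp_join_append (xs : List (List Char)) (y : List Char) :
    PySem.Chars.join [] (xs ++ [y]) = PySem.Chars.join [] xs ++ y := by
  induction xs with
  | nil => simp [PySem.Chars.join_singleton, PySem.Chars.join_nil]
  | cons x t ih => rw [List.cons_append, acp_join_cons, acp_join_cons, ih, List.append_assoc]

-- A's loop computes the group ints of acpGrp
theorem acp_main_A (pairs : List (Int × Bool)) :
    ∀ (result : List Int) (g : List Int),
      acpLoopA pairs result (PySem.Chars.join [] (g.map PySem.Int.toChars)) =
        result ++ (acpGrp g pairs).map acpSegInt := by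
  induction pairs with
  | nil => intro result g; simp [acpLoopA, acpGrp, acpSegInt]
  | cons p rest ih =>
      intro result g
      obtain ⟨num, concat⟩ := p
      by_cases hc : concat
      · have h1 : PySem.Chars.join [] (g.map PySem.Int.toChars) ++ PySem.Int.toChars num
            = PySem.Chars.join [] ((g ++ [num]).map PySem.Int.toChars) := by
          rw [List.map_append, List.map_singleton, acp_join_append]
        simp only [acpLoopA, hc, if_pos, acpGrp, h1]
        exact ih result (g ++ [num])
      · have h2 : PySem.Int.toChars num
            = PySem.Chars.join [] (([num] : List Int).map PySem.Int.toChars) := by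
          simp [PySem.Chars.join_singleton]
        simp only [acpLoopA, hc, if_neg, Bool.false_eq_true, not_false_iff, acpGrp, h2]
        rw [ih (result ++ [(PySem.Int.ofChars? (PySem.Chars.join [] (g.map PySem.Int.toChars))).getD 0]) [num]]
        simp [acpSegInt]

theorem acpBreaks_cons (n : Int) (b : Bool) (t : List (Int × Bool)) :
    acpBreaks ((n, b) :: t)
      = (if b then [] else [1]) ++ (acpBreaks t).map (· + 1) := by
  have htail : List.filterMap
      ((fun i => if (((n, b) :: t).getD i (0, true)).2 = true then none else some (i + 1)) ∘ Nat.succ)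
      (List.range t.length) = (acpBreaks t).map (· + 1) := by
    unfold acpBreaks
    rw [List.map_filterMap]
    apply List.filterMap_congr
    intro i _
    simp only [Function.comp, List.getD_cons_succ]
    split <;> simp
  unfold acpBreaks
  rw [List.length_cons, List.range_succ_eq_map, List.filterMap_cons, List.filterMap_map, htail]
  cases b <;> simp <;> rfl

theorem acpSegs_prefix (ys zs : List Int) (cs : List Nat) :
    ∀ a : Nat, (∀ c ∈ cs, c ≤ ys.length) → a ≤ ys.length →
      acpSegs (ys ++ zs) a cs = acpSegs ys a cs := by
  induction cs with
  | nil => intro a _ _; rfl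
  | cons b t ih =>
      intro a hbd ha
      have hb : b ≤ ys.length := hbd b (List.mem_cons_self ..)
      simp only [acpSegs]
      congr 1
      · rw [List.drop_append_of_le_length ha]
        rw [List.take_append_of_le_length (by simp; omega)]
      · exact ih b (fun c hc => hbd c (List.mem_cons_of_mem _ hc)) hb

theorem acpBreaks_le (pairs : List (Int × Bool)) :
    ∀ c ∈ acpBreaks pairs, c ≤ pairs.length := by
  intro c hc
  unfold acpBreaks at hc
  rw [List.mem_filterMap] at hc
  obtain ⟨i, hi, hv⟩ := hc
  rw [List.mem_range] at hi
  split at hv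
  · exact absurd hv (by simp)
  · simp only [Option.some.injEq] at hv
    omega

-- B's zip-of-consecutive-cuts map is acpSegs (after the slice bridge)
theorem acpSegs_shift (xs : List Int) (d : Nat) (cs : List Nat) :
    ∀ a : Nat, acpSegs xs (a + d) (cs.map (· + d)) = acpSegs (xs.drop d) a cs := by
  induction cs with
  | nil => intro a; rfl
  | cons b t ih =>
      intro a
      simp only [List.map_cons, acpSegs, List.drop_drop]
      congr 1
      · congr 1
        · omega
        · congr 1
          omega
      · exact ih b

theorem acp_map_fst_zip (rest : List Int) (pattern : List Bool) :
    (rest.zip pattern).map Prod.fst = rest.take (rest.zip pattern).length := by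
  induction rest generalizing pattern with
  | nil => simp
  | cons x t ih =>
      cases pattern with
      | nil => simp
      | cons p q => simp [List.zip_cons_cons, ih q]

-- the slices at the break cuts are exactly acpGrp
theorem acp_main_B (pairs : List (Int × Bool)) :
    ∀ (g : List Int), g ≠ [] →
      acpSegs (g ++ pairs.map Prod.fst) 0
        ((acpBreaks pairs).map (· + (g.length - 1)) ++ [g.length + pairs.length])
      = acpGrp g pairs := by
  induction pairs with
  | nil =>
      intro g _
      simp [acpBreaks, acpSegs, acpGrp]
  | cons p t ih =>
      intro g hg
      obtain ⟨n, b⟩ := p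
      have hm : 1 ≤ g.length := List.length_pos_of_ne_nil hg
      rw [acpBreaks_cons]
      by_cases hb : b
      · subst hb
        have hmap : ((acpBreaks t).map (· + 1)).map (· + (g.length - 1))
            = (acpBreaks t).map (· + ((g ++ [n]).length - 1)) := by
          simp only [List.map_map, List.length_append]
          apply List.map_congr_left
          intro x _
          simp only [Function.comp, List.length_cons, List.length_nil]
          omega
        have hlen : g.length + (((n, true) :: t)).length = (g ++ [n]).length + t.length := by
          simp; omega
        simp only [if_pos, List.nil_append, hmap, hlen]
        have hxs : g ++ ((n, true) :: t).map Prod.fst = (g ++ [n]) ++ t.map Prod.fst := by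
          simp
        rw [hxs]
        exact ih (g ++ [n]) (by simp)
      · simp only [if_neg hb, List.cons_append, List.map_cons, List.nil_append]
        have h1 : 1 + (g.length - 1) = g.length := by omega
        rw [h1]
        show acpSegs _ 0 (g.length :: _) = _
        simp only [acpSegs, Nat.sub_zero, List.drop_zero]
        have hbhd : b = false := by simpa using hb
        subst hbhd
        simp only [acpGrp, if_neg (by simp : ¬ (false = true))]
        congr 1
        · simp [List.take_append_of_le_length (le_refl g.length)]
        · -- shift the remaining cuts by g.length and apply the IH at head [n]
          have hcuts : ((acpBreaks t).map (· + 1)).map (· + (g.length - 1))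
                ++ [g.length + (((n, false) :: t)).length]
              = (((acpBreaks t).map (· + 0) ++ [1 + t.length]).map (· + g.length)) := by
            simp only [List.map_append, List.map_map, List.length_cons, List.map_cons,
              List.map_nil]
            congr 1
            · apply List.map_congr_left
              intro x _
              simp only [Function.comp]
              omega
            · congr 1
              omega
          rw [hcuts]
          have := acpSegs_shift (g ++ (n :: t.map Prod.fst)) g.length
            ((acpBreaks t).map (· + 0) ++ [1 + t.length]) 0
          rw [Nat.zero_add] at this
          rw [this]
          have hdrop : (g ++ (n :: t.map Prod.fst)).drop g.length = [n] ++ t.map Prod.fst := by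
            simp [List.drop_append_of_le_length (le_refl g.length)]
          rw [hdrop]
          have h0 : (acpBreaks t).map (· + 0) = (acpBreaks t).map (· + (([n] : List Int).length - 1)) := rfl
          rw [h0]
          have h1t : ([1 + t.length] : List Nat) = [([n] : List Int).length + t.length] := by simp
          rw [h1t]
          exact ih [n] (by simp)

theorem acp_zipmap (xs : List Int) (cs : List Nat) :
    ∀ a : Nat,
      (((a :: cs).zip cs).map fun ab =>
        acpSegInt (PySem.List.slice xs (some ((ab.1 : Nat) : Int)) (some ((ab.2 : Nat) : Int))))
      = (acpSegs xs a cs).map acpSegInt := by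
  induction cs with
  | nil => intro a; rfl
  | cons b t ih =>
      intro a
      simp only [List.zip_cons_cons, List.map_cons, acpSegs]
      rw [PySem.List.slice_natCast]
      exact congrArg _ (ih b)

-- B's range/getD comprehension equals acpBreaks over the zipped pairs
theorem acp_breaks_eq (rest : List Int) (pattern : List Bool) :
    ((List.range (rest.zip pattern).length).filterMap fun i =>
        if pattern.getD i true then none else some (i + 1))
      = acpBreaks (rest.zip pattern) := by
  unfold acpBreaks
  apply List.filterMap_congr
  intro i hi
  rw [List.mem_range] at hi
  have hip : i < pattern.length := lt_of_lt_of_le hi (by rw [List.length_zip]; omega)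
  have hiz : i < (rest.zip pattern).length := hi
  rw [List.getD_eq_getElem pattern true hip, List.getD_eq_getElem _ _ hiz, List.getElem_zip]

-- ===== VERDICT =====
theorem apply_concat_pattern_spec : Claim_equal_apply_concat_pattern := by
  intro numbers pattern _ hpre
  unfold Spec_apply_concat_pattern
  cases numbers with
  | nil => exact absurd rfl hpre.1
  | cons n0 rest =>
      show acpLoopA (rest.zip pattern) [] (PySem.Int.toChars n0) = _
      have h0 : PySem.Int.toChars n0
          = PySem.Chars.join [] (([n0] : List Int).map PySem.Int.toChars) := by
        simp [PySem.Chars.join_singleton]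
      rw [h0, acp_main_A (rest.zip pattern) [] [n0], List.nil_append]
      -- now reduce B's definition to the same group ints
      show _ = apply_concat_pattern_alt (n0 :: rest) pattern
      unfold apply_concat_pattern_alt
      simp only [List.length_cons, Nat.add_sub_cancel]
      have hk : 1 + min rest.length pattern.length - 1 = (rest.zip pattern).length := by
        rw [List.length_zip]; omega
      rw [hk, acp_breaks_eq]
      have hkk : 1 + min rest.length pattern.length = 1 + (rest.zip pattern).length := by
        rw [List.length_zip]
      rw [hkk]
      set pairs := rest.zip pattern with hp
      set L := pairs.length with hLdef
      have hz : ((0 : Nat) :: (acpBreaks pairs ++ [1 + L])).tail = acpBreaks pairs ++ [1 + L] := rfl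
      show (acpGrp [n0] pairs).map acpSegInt = _
      have hzip := acp_zipmap (n0 :: rest) (acpBreaks pairs ++ [1 + L]) 0
      simp only [List.cons_append, List.nil_append, List.tail_cons] at hzip ⊢
      rw [hzip]
      -- restrict the sliced list to the used prefix
      have hsplit : (n0 :: rest) = ([n0] ++ pairs.map Prod.fst) ++ rest.drop L := by
        have : pairs.map Prod.fst = rest.take L := acp_map_fst_zip rest pattern
        rw [this]; simp
      have hlenys : ([n0] ++ pairs.map Prod.fst).length = 1 + L := by
        simp [hLdef]; omega
      have hbd : ∀ c ∈ acpBreaks pairs ++ [1 + L], c ≤ ([n0] ++ pairs.map Prod.fst).length := by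
        intro c hc
        rw [hlenys]
        rcases List.mem_append.mp hc with h | h
        · have := acpBreaks_le pairs c h; omega
        · simp at h; omega
      rw [hsplit, acpSegs_prefix _ _ _ 0 hbd (by omega)]
      have hcs : acpBreaks pairs ++ [1 + L]
          = (acpBreaks pairs).map (· + (([n0] : List Int).length - 1)) ++ [([n0] : List Int).length + L] := by
        simp
      rw [hcs, acp_main_B pairs [n0] (by simp)]
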